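-- pv_equiv track=rewrite | github.com/nowgnas/elicePythton | onlineClass/week12tree/class2/k번째수찾기.py | findKth
-- ===== SOURCE A (Python) =====
-- def findKth(myInput, k):
--     '''
--     매 순간마다 k번째로 작은 원소를 리스트로 반환합니다.
--     '''
--     answer = []
--     result = []
--     for item in myInput:
--         result.append(item)
--         if len(result) < k:
--             answer.append(-1)
--         else:
--             single_result = result[:]
--             single_result.sort()
--             answer.append(single_result[k-1])
--
--     return answer
-- ===== SOURCE B (Python) =====
-- def findKth(myInput, k):
--     '''
--     Incrementally maintains one sorted window by insertion instead of
--     re-sorting a copy of the prefix at every step.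
--     '''
--     answer = []
--     window = []
--     for item in myInput:
--         pos = 0
--         while pos < len(window) and window[pos] <= item:
--             pos += 1
--         window.insert(pos, item)
--         if len(window) < k:
--             answer.append(-1)
--         else:
--             answer.append(window[k - 1])
--     return answer
-- ===== Notes on version B (the rewrite author's own statement) =====
-- stated objective: faster
-- what changed: B maintains one incrementally sorted window (linear insertion per element) and reads its (k-1)-th entry, instead of copying and fully re-sorting the whole prefix at every step as A does.
import Mathlib
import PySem

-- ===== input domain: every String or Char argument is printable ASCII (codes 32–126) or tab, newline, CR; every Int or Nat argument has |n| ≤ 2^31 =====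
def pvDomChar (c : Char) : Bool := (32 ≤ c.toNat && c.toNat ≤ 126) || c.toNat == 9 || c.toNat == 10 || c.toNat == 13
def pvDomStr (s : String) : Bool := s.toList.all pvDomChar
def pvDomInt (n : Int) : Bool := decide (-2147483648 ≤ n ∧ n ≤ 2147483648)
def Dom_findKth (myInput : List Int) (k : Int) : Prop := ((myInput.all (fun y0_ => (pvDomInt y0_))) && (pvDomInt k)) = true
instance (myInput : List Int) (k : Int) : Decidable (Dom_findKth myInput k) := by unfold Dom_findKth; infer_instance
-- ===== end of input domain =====

-- B maintains one incrementally sorted window (linear insertion per element) instead of copying and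
-- fully re-sorting the prefix at every step as A does; return values proved equal wherever A returns.


-- ===== PORT A =====
-- state = (answer, result); single_result.sort() → PySem.List.sorted; single_result[k-1] → pyGet?
-- (the .getD 0 default is only reached where Python raises IndexError, i.e. outside Pre_).
def findKth (myInput : List Int) (k : Int) : List Int :=
  (myInput.foldl
    (fun (st : List Int × List Int) item =>
      let result := st.2 ++ [item]
      if (result.length : Int) < k then (st.1 ++ [-1], result)
      else
        let single_result := PySem.List.sorted result (fun x => x) false
        (st.1 ++ [(PySem.List.pyGet? single_result (k - 1)).getD 0], result))
    ([], [])).1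

-- ===== PORT B =====
-- hand port of B's while-scan + window.insert(pos, item): walk past the elements ≤ item and place
-- item at the first element > item — exactly where the Python scan leaves pos.
def insWindow (w : List Int) (item : Int) : List Int :=
  match w with
  | [] => [item]
  | y :: ys => if y ≤ item then y :: insWindow ys item else item :: y :: ys

def findKth_alt (myInput : List Int) (k : Int) : List Int :=
  (myInput.foldl
    (fun (st : List Int × List Int) item =>
      let window := insWindow st.2 item
      if (window.length : Int) < k then (st.1 ++ [-1], window)
      else (st.1 ++ [(PySem.List.pyGet? window (k - 1)).getD 0], window))
    ([], [])).1

-- ===== PRECONDITION & SPEC =====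
-- Pre_ excludes exactly the inputs on which the Python A raises IndexError (k < 0 with a nonempty
-- list: single_result[k-1] is out of range on the first iteration); B raises there too.
def Pre_findKth (myInput : List Int) (k : Int) : Prop := myInput = [] ∨ 0 ≤ k
instance (myInput : List Int) (k : Int) : Decidable (Pre_findKth myInput k) := by unfold Pre_findKth; infer_instance

def pvWitness_findKth : List Int × Int := ([3, 1, 2], 2)

def Spec_findKth (myInput : List Int) (k : Int) (out : List Int) : Prop := out = findKth_alt myInput k
instance (myInput : List Int) (k : Int) (out : List Int) : Decidable (Spec_findKth myInput k out) := by unfold Spec_findKth; infer_instance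

-- ===== CLAIM (what is proved, stated in full; the proofs are below) =====
def Claim_equal_findKth : Prop := ∀ (myInput : List Int) (k : Int), Dom_findKth myInput k → Pre_findKth myInput k → Spec_findKth myInput k (findKth myInput k)

-- ===== LEMMAS AND PROOFS =====

theorem insWindow_perm (w : List Int) (x : Int) : (insWindow w x).Perm (x :: w) := by
  induction w with
  | nil => exact List.Perm.refl _
  | cons y ys ih =>
    unfold insWindow
    split_ifs with h
    · exact (ih.cons y).trans (List.Perm.swap x y ys)
    · exact List.Perm.refl _

theorem mem_insWindow {z x : Int} {w : List Int} :
    z ∈ insWindow w x ↔ z = x ∨ z ∈ w := by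
  rw [(insWindow_perm w x).mem_iff, List.mem_cons]

theorem insWindow_pairwise {w : List Int} (x : Int) (h : w.Pairwise (· ≤ ·)) :
    (insWindow w x).Pairwise (· ≤ ·) := by
  induction w with
  | nil => simp [insWindow]
  | cons y ys ih =>
    rcases List.pairwise_cons.mp h with ⟨hy, hys⟩
    unfold insWindow
    split_ifs with hle
    · refine List.pairwise_cons.mpr ⟨?_, ih hys⟩
      intro z hz
      rcases mem_insWindow.mp hz with rfl | hz
      · exact hle
      · exact hy z hz
    · refine List.pairwise_cons.mpr ⟨?_, h⟩
      intro z hz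
      rcases List.mem_cons.mp hz with rfl | hz
      · omega
      · exact le_trans (by omega) (hy z hz)

theorem loop_eq (k : Int) (l : List Int) :
    ∀ (ans r w : List Int), w.Perm r → w.Pairwise (· ≤ ·) →
    (l.foldl
      (fun (st : List Int × List Int) item =>
        let result := st.2 ++ [item]
        if (result.length : Int) < k then (st.1 ++ [-1], result)
        else
          let single_result := PySem.List.sorted result (fun x => x) false
          (st.1 ++ [(PySem.List.pyGet? single_result (k - 1)).getD 0], result))
      (ans, r)).1
  = (l.foldl
      (fun (st : List Int × List Int) item =>
        let window := insWindow st.2 item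
        if (window.length : Int) < k then (st.1 ++ [-1], window)
        else (st.1 ++ [(PySem.List.pyGet? window (k - 1)).getD 0], window))
      (ans, w)).1 := by
  induction l with
  | nil => intro ans r w _ _; rfl
  | cons item t ih =>
    intro ans r w hp hs
    have hperm : (insWindow w item).Perm (r ++ [item]) :=
      ((insWindow_perm w item).trans (hp.cons item)).trans
        (List.perm_append_singleton item r).symm
    have hsorted' : (insWindow w item).Pairwise (· ≤ ·) := insWindow_pairwise item hs
    have hsortedeq : PySem.List.sorted (r ++ [item]) (fun x => x) false = insWindow w item :=
      PySem.List.sorted_id_eq_of_perm_of_pairwise _ _ hperm hsorted'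
    have hlen : ((r ++ [item]).length : Int) = ((insWindow w item).length : Int) := by
      rw [hperm.length_eq]
    simp only [List.foldl_cons]
    by_cases h : ((r ++ [item]).length : Int) < k
    · rw [if_pos h, if_pos (hlen ▸ h)]
      exact ih _ _ _ hperm hsorted'
    · rw [if_neg h, if_neg (hlen ▸ h), hsortedeq]
      exact ih _ _ _ hperm hsorted'

-- ===== VERDICT (by name: the statement is the Claim_ definition above) =====
theorem findKth_spec : Claim_equal_findKth := by
  intro myInput k _ _
  unfold Spec_findKth findKth findKth_alt
  exact loop_eq k myInput [] [] [] (List.Perm.refl _) List.Pairwise.nil
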